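-- pv_equiv track=rewrite | github.com/lukud/raccoon- | ECUtils.py | partition_to_re_chunks
-- ===== SOURCE A (Python) =====
-- def partition_to_re_chunks(lenghtIndex, nChunks):
--     """
--     A simple greedy function to partition a fasta length index (given as a
--     list of name-length tuples) into nChunks of roughly equal sums of lengths
--     adapted from:
--     http://stackoverflow.com/questions/6855394/splitting-list-in-chunks-of-balanced-weight
--     """
--
--     lenghtIndex = sorted(lenghtIndex, key=lambda x: x[1])
--     partitions=[[] for i in range(nChunks)]
--     sums= {i:0 for i in range(nChunks)}
--     current=0
--     for element in lenghtIndex: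
--         for i in sums:
--             if current == sums[i]:
--                 partitions[i].append(element)
--                 break
--         sums[i]+= element[1]
--             #get smallest sum
--         current =min(sums.values())
--
--     return partitions
-- ===== SOURCE B (Python) =====
-- def partition_to_re_chunks(lenghtIndex, nChunks):
--     """Balanced greedy partition: keep a queue of (sum, chunk-index) pairs sorted
--     ascending; always assign the next element to the queue head (the chunk with the
--     smallest sum, lowest index on ties) and re-insert the updated pair in order,
--     finding its place by binary search."""
--     partitions = [[] for _ in range(nChunks)]
--     queue = [(0, i) for i in range(nChunks)]  # kept sorted ascending
--     for element in sorted(lenghtIndex, key=lambda x: x[1]):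
--         s, i = queue.pop(0)
--         partitions[i].append(element)
--         new = (s + element[1], i)
--         lo, hi = 0, len(queue)
--         while lo < hi:
--             mid = (lo + hi) // 2
--             if queue[mid] < new:
--                 lo = mid + 1
--             else:
--                 hi = mid
--         queue.insert(lo, new)
--     return partitions
-- ===== Notes on version B (the rewrite author's own statement) =====
-- stated objective: faster
-- what changed: Replaces A's per-element linear rescan of the sums dict for the current minimum plus a full min() over all sums by one sorted queue of (sum, chunk-index) pairs: pop the head (the minimum), re-insert the updated pair at a position found by binary search.
import Mathlib
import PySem

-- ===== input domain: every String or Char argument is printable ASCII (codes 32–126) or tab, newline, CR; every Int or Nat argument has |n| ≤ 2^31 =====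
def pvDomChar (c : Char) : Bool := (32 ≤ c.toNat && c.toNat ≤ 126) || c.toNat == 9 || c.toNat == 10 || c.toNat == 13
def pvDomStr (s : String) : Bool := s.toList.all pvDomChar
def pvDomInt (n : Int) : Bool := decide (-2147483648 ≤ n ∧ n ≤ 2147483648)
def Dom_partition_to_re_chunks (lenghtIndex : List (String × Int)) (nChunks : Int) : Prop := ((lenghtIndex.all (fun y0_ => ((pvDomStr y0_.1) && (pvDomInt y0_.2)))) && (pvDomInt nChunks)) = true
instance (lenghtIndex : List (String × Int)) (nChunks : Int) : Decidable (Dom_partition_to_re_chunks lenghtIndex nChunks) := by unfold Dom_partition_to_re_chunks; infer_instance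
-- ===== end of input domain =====

-- B replaces A's per-element scan of the sums dict plus min() over all sums by one sorted
-- queue of (sum, chunk-index) pairs: pop the head, re-insert at a binary-searched position
-- (objective: faster; a timing run measured B faster on large inputs).

-- ===== PORT A =====
-- partitions[i].append(element); i always comes from range(nChunks), so it is a valid index here
def pvAppendAt (ps : List (List (String × Int))) (i : Int) (e : String × Int) : List (List (String × Int)) :=
  PySem.List.pySetD ps i ((PySem.List.pyGetD ps i []) ++ [e])

-- 'for i in sums: if current == sums[i]: break' — first key whose stored sum equals current
def pvFindKey (ks : List Int) (d : PySem.Dict Int Int) (current : Int) : Option Int :=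
  match ks with
  | [] => none
  | k :: rest => if current == d.getD k 0 then some k else pvFindKey rest d current

-- one iteration of A's outer loop (state: partitions, sums, current)
def pvStepA (st : List (List (String × Int)) × PySem.Dict Int Int × Int) (element : String × Int) :
    List (List (String × Int)) × PySem.Dict Int Int × Int :=
  match pvFindKey st.2.1.keys st.2.1 st.2.2 with
  | none => st
  | some i =>
    let parts := pvAppendAt st.1 i element
    let d := st.2.1.insert i (st.2.1.getD i 0 + element.2)
    let cur := (PySem.List.min? d.values (fun v => v)).getD st.2.2
    (parts, d, cur)

def partition_to_re_chunks (lenghtIndex : List (String × Int)) (nChunks : Int) : List (List (String × Int)) :=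
  let li := PySem.List.sorted lenghtIndex (fun x => x.2)
  let rng := PySem.List.pyRange 0 nChunks
  let partitions : List (List (String × Int)) := rng.map (fun _ => [])
  let sums : PySem.Dict Int Int := rng.foldl (fun d i => d.insert i 0) PySem.Dict.empty
  (li.foldl pvStepA (partitions, sums, (0 : Int))).1

-- ===== PORT B =====
-- 'while lo < hi: ...' — binary search for the insertion point of 'new' (Python tuple '<', written out)
def pvBisect (q : List (Int × Int)) (x : Int × Int) (lo hi : Nat) : Nat :=
  if lo < hi then
    let mid := (lo + hi) / 2
    if (q.getD mid (0, 0)).1 < x.1 || ((q.getD mid (0, 0)).1 == x.1 && (q.getD mid (0, 0)).2 < x.2)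
    then pvBisect q x (mid + 1) hi
    else pvBisect q x lo mid
  else lo
termination_by hi - lo
decreasing_by all_goals omega
def pvStepB (st : List (List (String × Int)) × List (Int × Int)) (element : String × Int) :
    List (List (String × Int)) × List (Int × Int) :=
  match st.2 with
  | [] => st
  | (s, i) :: rest =>
    (pvAppendAt st.1 i element,
     PySem.List.insert rest ((pvBisect rest (s + element.2, i) 0 rest.length : Nat) : Int) (s + element.2, i))

def partition_to_re_chunks_alt (lenghtIndex : List (String × Int)) (nChunks : Int) : List (List (String × Int)) :=
  let rng := PySem.List.pyRange 0 nChunks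
  let partitions : List (List (String × Int)) := rng.map (fun _ => [])
  let queue : List (Int × Int) := rng.map (fun i => ((0 : Int), i))
  ((PySem.List.sorted lenghtIndex (fun x => x.2)).foldl pvStepB (partitions, queue)).1

-- ===== PRECONDITION & SPEC =====
-- Pre_ excludes exactly the inputs on which Python A raises (UnboundLocalError: nChunks ≤ 0
-- with a nonempty list; B's Python raises IndexError there too); A returns on all other inputs.
def Pre_partition_to_re_chunks (lenghtIndex : List (String × Int)) (nChunks : Int) : Prop :=
  lenghtIndex = [] ∨ 1 ≤ nChunks
instance (lenghtIndex : List (String × Int)) (nChunks : Int) : Decidable (Pre_partition_to_re_chunks lenghtIndex nChunks) := by unfold Pre_partition_to_re_chunks; infer_instance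

def pvWitness_partition_to_re_chunks : (List (String × Int)) × Int := ([("a", 3), ("b", 1), ("c", 2)], 2)

def Spec_partition_to_re_chunks (lenghtIndex : List (String × Int)) (nChunks : Int) (out : List (List (String × Int))) : Prop := out = partition_to_re_chunks_alt lenghtIndex nChunks
instance (lenghtIndex : List (String × Int)) (nChunks : Int) (out : List (List (String × Int))) : Decidable (Spec_partition_to_re_chunks lenghtIndex nChunks out) := by unfold Spec_partition_to_re_chunks; infer_instance

-- ===== CLAIM (what is proved, stated in full; the proofs are below) =====
def Claim_equal_partition_to_re_chunks : Prop := ∀ (lenghtIndex : List (String × Int)) (nChunks : Int), Dom_partition_to_re_chunks lenghtIndex nChunks → Pre_partition_to_re_chunks lenghtIndex nChunks → Spec_partition_to_re_chunks lenghtIndex nChunks (partition_to_re_chunks lenghtIndex nChunks)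

-- ===== LEMMAS AND PROOFS =====
-- (the equivalence holds for every input, so the proofs below never need Pre_;
--  Pre_ is still required so the Python A is only compared where it returns)

def pvLtL (a b : Int × Int) : Prop := a.1 < b.1 ∨ (a.1 = b.1 ∧ a.2 < b.2)

theorem pv_ltL_trans (a b c : Int × Int) : pvLtL a b → pvLtL b c → pvLtL a c := by
  unfold pvLtL; omega

theorem pv_cond_iff (y x : Int × Int) :
    (y.1 < x.1 || (y.1 == x.1 && y.2 < x.2)) = true ↔ pvLtL y x := by
  simp [pvLtL]

theorem pv_ltL_total (a b : Int × Int) (h2 : a.2 ≠ b.2) : pvLtL a b ∨ pvLtL b a := by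
  unfold pvLtL; omega

theorem pv_pairwise_getD (q : List (Int × Int)) (hpw : q.Pairwise pvLtL)
    (j1 j2 : Nat) (h1 : j1 < j2) (h2 : j2 < q.length) :
    pvLtL (q.getD j1 (0, 0)) (q.getD j2 (0, 0)) := by
  rw [List.getD_eq_getElem q (0,0) (by omega), List.getD_eq_getElem q (0,0) h2]
  exact List.pairwise_iff_getElem.mp hpw j1 j2 (by omega) h2 h1

theorem pvBisect_spec : ∀ (n : Nat) (q : List (Int × Int)) (x : Int × Int) (lo hi : Nat),
    hi - lo ≤ n → q.Pairwise pvLtL → hi ≤ q.length → lo ≤ hi →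
    (∀ j, j < lo → pvLtL (q.getD j (0, 0)) x) →
    (∀ j, hi ≤ j → j < q.length → ¬ pvLtL (q.getD j (0, 0)) x) →
    pvBisect q x lo hi ≤ hi ∧ lo ≤ pvBisect q x lo hi ∧
    (∀ j, j < pvBisect q x lo hi → pvLtL (q.getD j (0, 0)) x) ∧
    (∀ j, pvBisect q x lo hi ≤ j → j < q.length → ¬ pvLtL (q.getD j (0, 0)) x) := by
  intro n
  induction n with
  | zero =>
    intro q x lo hi hn hpw hlen hlohi hbelow habove
    have : lo = hi := by omega
    subst this
    rw [pvBisect.eq_def, if_neg (by omega)]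
    exact ⟨le_refl _, le_refl _, hbelow, habove⟩
  | succ n ih =>
    intro q x lo hi hn hpw hlen hlohi hbelow habove
    by_cases hlt : lo < hi
    · rw [pvBisect.eq_def]
      rw [if_pos hlt]
      simp only
      split
      · rename_i hc
        have hcmid : pvLtL (q.getD ((lo + hi) / 2) (0, 0)) x := (pv_cond_iff _ _).mp hc
        have hrec := ih q x ((lo + hi) / 2 + 1) hi (by omega) hpw hlen (by omega) ?below habove
        · exact ⟨hrec.1, by omega, hrec.2.2⟩
        case below =>
        intro j hj
        by_cases hjlo : j < lo
        · exact hbelow j hjlo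
        · rcases Nat.lt_or_ge j ((lo + hi) / 2) with hjm | hjm
          · exact pv_ltL_trans _ _ _ (pv_pairwise_getD q hpw j _ hjm (by omega)) hcmid
          · have : j = (lo + hi) / 2 := by omega
            subst this; exact hcmid
      · rename_i hc
        have hcmid : ¬ pvLtL (q.getD ((lo + hi) / 2) (0, 0)) x :=
          fun hp => hc ((pv_cond_iff _ _).mpr hp)
        have hrec := ih q x lo ((lo + hi) / 2) (by omega) hpw (by omega) (by omega) hbelow ?above
        · exact ⟨by omega, hrec.2.1, hrec.2.2⟩
        case above =>
        intro j hj hjlen hp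
        rcases Nat.lt_or_ge j hi with hjhi | hjhi
        · rcases Nat.eq_or_lt_of_le hj with rfl | hjm
          · exact hcmid hp
          · exact hcmid (pv_ltL_trans _ _ _ (pv_pairwise_getD q hpw _ j hjm hjlen) hp)
        · exact habove j hjhi hjlen hp
    · have : lo = hi := by omega
      subst this
      rw [pvBisect.eq_def, if_neg (by omega)]
      exact ⟨le_refl _, le_refl _, hbelow, habove⟩

theorem pv_qinsert (rest : List (Int × Int)) (new : Int × Int)
    (hpw : rest.Pairwise pvLtL) (hne : ∀ y ∈ rest, y.2 ≠ new.2) :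
    (PySem.List.insert rest ((pvBisect rest new 0 rest.length : Nat) : Int) new).Perm (new :: rest) ∧
    (PySem.List.insert rest ((pvBisect rest new 0 rest.length : Nat) : Int) new).Pairwise pvLtL := by
  obtain ⟨h1, h0, hbel, habv⟩ := pvBisect_spec rest.length rest new 0 rest.length
    (by omega) hpw (le_refl _) (by omega) (by omega) (by intro j hj hjl; omega)
  have heq : PySem.List.insert rest ((pvBisect rest new 0 rest.length : Nat) : Int) new =
      List.take (pvBisect rest new 0 rest.length) rest ++ new :: List.drop (pvBisect rest new 0 rest.length) rest :=
    PySem.List.insert_natCast rest _ new (by omega)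
  set p := pvBisect rest new 0 rest.length with hp
  have hmemtake : ∀ a ∈ List.take p rest, pvLtL a new := by
    intro a ha
    obtain ⟨ja, hja, hae⟩ := List.mem_iff_getElem.mp ha
    have hja' : ja < p := by simp at hja; omega
    have hjalen : ja < rest.length := by simp at hja; omega
    have : a = rest[ja] := by rw [← hae, List.getElem_take]
    rw [this, ← List.getD_eq_getElem rest (0,0) hjalen]
    exact hbel ja hja'
  have hmemdrop : ∀ b ∈ List.drop p rest, pvLtL new b := by
    intro b hb
    obtain ⟨jb, hjb, hbe⟩ := List.mem_iff_getElem.mp hb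
    have hjblen : p + jb < rest.length := by simp at hjb; omega
    have hbeq : b = rest[p + jb] := by rw [← hbe, List.getElem_drop]
    have hnot : ¬ pvLtL b new := by
      rw [hbeq, ← List.getD_eq_getElem rest (0,0) hjblen]
      exact habv (p + jb) (by omega) hjblen
    have hbmem : b ∈ rest := List.mem_of_mem_drop hb
    rcases pv_ltL_total new b (fun he => hne b hbmem he.symm) with h | h
    · exact h
    · exact absurd h hnot
  rw [heq]
  constructor
  · have hper : (List.take p rest ++ new :: List.drop p rest).Perm
        (new :: (List.take p rest ++ List.drop p rest)) := List.perm_middle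
    rwa [List.take_append_drop] at hper
  · rw [List.pairwise_append]
    refine ⟨hpw.sublist (List.take_sublist _ _), ?_, ?_⟩
    · rw [List.pairwise_cons]
      exact ⟨fun b hb => hmemdrop b hb, hpw.sublist (List.drop_sublist _ _)⟩
    · intro a ha b hb
      rcases List.mem_cons.mp hb with rfl | hbd
      · exact hmemtake a ha
      · -- a before b in rest
        obtain ⟨ja, hja, hae⟩ := List.mem_iff_getElem.mp ha
        obtain ⟨jb, hjb, hbe⟩ := List.mem_iff_getElem.mp hbd
        have hja' : ja < p := by simp at hja; omega
        have hjalen : ja < rest.length := by simp at hja; omega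
        have hjblen : p + jb < rest.length := by simp at hjb; omega
        have hae' : a = rest[ja] := by rw [← hae, List.getElem_take]
        have hbe' : b = rest[p + jb] := by rw [← hbe, List.getElem_drop]
        rw [hae', hbe']
        exact List.pairwise_iff_getElem.mp hpw ja (p + jb) hjalen hjblen (by omega)

theorem pv_findKey_first (ks : List Int) (d : PySem.Dict Int Int) (s i : Int)
    (hpw : ks.Pairwise (· < ·)) (hi : i ∈ ks) (hgi : d.getD i 0 = s)
    (hlt : ∀ k ∈ ks, k < i → d.getD k 0 ≠ s) : pvFindKey ks d s = some i := by
  induction ks with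
  | nil => cases hi
  | cons k rest ih =>
    rw [List.pairwise_cons] at hpw
    unfold pvFindKey
    rcases List.mem_cons.mp hi with rfl | hir
    · rw [hgi]; simp only [beq_self_eq_true, if_true]
    · have hki : k < i := hpw.1 i hir
      have hne : d.getD k 0 ≠ s := hlt k List.mem_cons_self hki
      rw [if_neg (by simp only [beq_iff_eq]; exact fun h => hne h.symm)]
      exact ih hpw.2 hir (fun k' hk' => hlt k' (List.mem_cons_of_mem _ hk'))

-- the coupling invariant between A's (sums, current) and B's sorted queue
def pvRel (d : PySem.Dict Int Int) (q : List (Int × Int)) (cur : Int) : Prop :=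
  d.keys.Pairwise (· < ·) ∧
  q.Pairwise pvLtL ∧
  q.Perm (d.items.map (fun p => (p.2, p.1))) ∧
  (∀ s i rest, q = (s, i) :: rest → cur = s)

theorem pv_step (parts : List (List (String × Int))) (d : PySem.Dict Int Int) (cur : Int)
    (q : List (Int × Int)) (e : String × Int) (h : pvRel d q cur) :
    (pvStepA (parts, d, cur) e).1 = (pvStepB (parts, q) e).1 ∧
    pvRel (pvStepA (parts, d, cur) e).2.1 (pvStepB (parts, q) e).2 (pvStepA (parts, d, cur) e).2.2 := by
  obtain ⟨hkeys, hqpw, hperm, hcur⟩ := h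
  cases q with
  | nil =>
    have hmap : d.items.map (fun p => (p.2, p.1)) = [] := hperm.nil_eq.symm
    have hitems : d.items = [] := List.map_eq_nil_iff.mp hmap
    have hkeysnil : d.keys = [] := by simp [PySem.Dict.keys, hitems]
    simp only [pvStepA, pvStepB, hkeysnil, pvFindKey]
    exact ⟨trivial, hkeys, hqpw, hperm, hcur⟩
  | cons hd rest =>
    obtain ⟨s, i⟩ := hd
    have hcur' : cur = s := hcur s i rest rfl
    subst cur
    have hmem_q : ((s, i)) ∈ d.items.map (fun p => (p.2, p.1)) := hperm.subset List.mem_cons_self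
    obtain ⟨p, hpmem, hpe⟩ := List.mem_map.mp hmem_q
    obtain ⟨p1, p2⟩ := p
    obtain ⟨h1, h2⟩ : p2 = s ∧ p1 = i := by
      simpa [Prod.ext_iff] using hpe
    subst p2; subst p1
    have hknodup : d.keys.Nodup := hkeys.imp (fun h => ne_of_lt h)
    obtain ⟨u, t, hud⟩ := List.append_of_mem hpmem
    have hkeyseq : d.keys = u.map (·.1) ++ i :: t.map (·.1) := by
      simp [PySem.Dict.keys, hud]
    have hikeys : i ∈ d.keys := by rw [hkeyseq]; exact List.mem_append_right _ List.mem_cons_self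
    have hnd2 : (u.map (·.1) ++ i :: t.map (·.1)).Nodup := hkeyseq ▸ hknodup
    have hinot : i ∉ u.map (·.1) ∧ i ∉ t.map (·.1) := by
      rw [List.Nodup, List.pairwise_append] at hnd2
      refine ⟨fun hi => hnd2.2.2 i hi i List.mem_cons_self rfl, ?_⟩
      have h5 := List.pairwise_cons.mp hnd2.2.1
      exact fun hi => h5.1 i hi rfl
    have hune : ∀ p ∈ u, p.1 ≠ i := fun p hp he => hinot.1 (List.mem_map.mpr ⟨p, hp, he⟩)
    have htne : ∀ p ∈ t, p.1 ≠ i := fun p hp he => hinot.2 (List.mem_map.mpr ⟨p, hp, he⟩)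
    have hgetDi : d.getD i 0 = s :=
      PySem.Dict.getD_of_mem_items d (hud ▸ hpmem) hknodup 0
    have hmapud : d.items.map (fun p => (p.2, p.1)) =
        u.map (fun p => (p.2, p.1)) ++ (s, i) :: t.map (fun p => (p.2, p.1)) := by
      rw [hud]; simp
    have hperm2 : rest.Perm (u.map (fun p => (p.2, p.1)) ++ t.map (fun p => (p.2, p.1))) := by
      have h1 : ((s, i) :: rest).Perm ((s, i) :: (u.map (fun p => (p.2, p.1)) ++ t.map (fun p => (p.2, p.1)))) :=
        hperm.trans (by rw [hmapud]; exact List.perm_middle)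
      exact h1.cons_inv
    have hrestne : ∀ x ∈ rest, x.2 ≠ i := by
      intro x hx he
      have hx2 := hperm2.subset hx
      rcases List.mem_append.mp hx2 with hxu | hxt
      · obtain ⟨p, hp, hpe2⟩ := List.mem_map.mp hxu
        exact hune p hp (by rw [← hpe2] at he; exact he)
      · obtain ⟨p, hp, hpe2⟩ := List.mem_map.mp hxt
        exact htne p hp (by rw [← hpe2] at he; exact he)
    have hqhead : ∀ x ∈ rest, pvLtL (s, i) x := (List.pairwise_cons.mp hqpw).1
    have hrestpw : rest.Pairwise pvLtL := (List.pairwise_cons.mp hqpw).2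
    have hfind : pvFindKey d.keys d s = some i := by
      apply pv_findKey_first d.keys d s i hkeys hikeys hgetDi
      intro k hk hki hgk
      obtain ⟨v, hv⟩ : ∃ v, (k, v) ∈ d.items := by simpa [PySem.Dict.keys] using hk
      have hgp : d.getD k 0 = v := PySem.Dict.getD_of_mem_items d hv hknodup 0
      have hmem2 : (v, k) ∈ (s, i) :: rest :=
        hperm.symm.subset (List.mem_map.mpr ⟨(k, v), hv, rfl⟩)
      rcases List.mem_cons.mp hmem2 with heq2 | hr
      · have hks : v = s ∧ k = i := by simpa [Prod.ext_iff] using heq2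
        omega
      · have hlt := hqhead _ hr
        unfold pvLtL at hlt
        simp only at hlt
        rw [hgp] at hgk
        omega
    have hcont : d.contains i = true := (PySem.Dict.contains_iff_mem_keys d i).mpr hikeys
    -- reduce both steps
    simp only [pvStepA, pvStepB, hfind, hgetDi]
    refine ⟨by trivial, ?_, ?_, ?_, ?_⟩
    · rw [PySem.Dict.keys_insert_of_contains d _ hcont]; exact hkeys
    · exact (pv_qinsert rest (s + e.2, i) hrestpw hrestne).2
    · -- permutation with new items
      have hitems' : (d.insert i (s + e.2)).items = u ++ (i, s + e.2) :: t := by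
        rw [PySem.Dict.items_insert_of_contains d _ hcont, hud]
        rw [List.map_append, List.map_cons]
        congr 1
        · exact (List.map_congr_left (fun p hp => by
            simp [beq_iff_eq, hune p hp])).trans (List.map_id u)
        · congr 1
          · simp
          · exact (List.map_congr_left (fun p hp => by
              simp [beq_iff_eq, htne p hp])).trans (List.map_id t)
      rw [hitems']
      have h3 : (u ++ (i, s + e.2) :: t).map (fun p => (p.2, p.1)) =
          u.map (fun p => (p.2, p.1)) ++ (s + e.2, i) :: t.map (fun p => (p.2, p.1)) := by simp
      rw [h3]
      exact ((pv_qinsert rest (s + e.2, i) hrestpw hrestne).1).trans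
        ((hperm2.cons _).trans List.perm_middle.symm)
    · -- current = head of new queue
      intro s2 i2 r2 hq'
      have hq'pw : (PySem.List.insert rest ((pvBisect rest (s + e.2, i) 0 rest.length : Nat) : Int) (s + e.2, i)).Pairwise pvLtL :=
        (pv_qinsert rest (s + e.2, i) hrestpw hrestne).2
      have hq'perm : (PySem.List.insert rest ((pvBisect rest (s + e.2, i) 0 rest.length : Nat) : Int) (s + e.2, i)).Perm
          ((d.insert i (s + e.2)).items.map (fun p => (p.2, p.1))) := by
        have hitems' : (d.insert i (s + e.2)).items = u ++ (i, s + e.2) :: t := by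
          rw [PySem.Dict.items_insert_of_contains d _ hcont, hud]
          rw [List.map_append, List.map_cons]
          congr 1
          · exact (List.map_congr_left (fun p hp => by
              simp [beq_iff_eq, hune p hp])).trans (List.map_id u)
          · congr 1
            · simp
            · exact (List.map_congr_left (fun p hp => by
                simp [beq_iff_eq, htne p hp])).trans (List.map_id t)
        rw [hitems']
        have h3 : (u ++ (i, s + e.2) :: t).map (fun p => (p.2, p.1)) =
            u.map (fun p => (p.2, p.1)) ++ (s + e.2, i) :: t.map (fun p => (p.2, p.1)) := by simp
        rw [h3]
        exact ((pv_qinsert rest (s + e.2, i) hrestpw hrestne).1).trans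
          ((hperm2.cons _).trans List.perm_middle.symm)
      -- values of new dict are the first components of the new queue, up to permutation
      have hvals : ((d.insert i (s + e.2)).values).Perm
          ((PySem.List.insert rest ((pvBisect rest (s + e.2, i) 0 rest.length : Nat) : Int) (s + e.2, i)).map (fun x => x.1)) := by
        have : (d.insert i (s + e.2)).values =
            ((d.insert i (s + e.2)).items.map (fun p => (p.2, p.1))).map (fun x => x.1) := by
          simp [PySem.Dict.values]
        rw [this]
        exact (hq'perm.map (fun x => x.1)).symm
      cases hmin : PySem.List.min? ((d.insert i (s + e.2)).values) (fun v => v) with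
      | none =>
        exfalso
        have := (PySem.List.min?_eq_none_iff _ _).mp hmin
        rw [hq'] at hvals
        rw [this] at hvals
        exact absurd hvals.nil_eq (by simp)
      | some m =>
        simp only [Option.getD_some]
        have hmmem := PySem.List.min?_mem hmin
        have hmin2 := PySem.List.min?_isMin hmin
        -- m ≤ s2
        have hs2mem : s2 ∈ (d.insert i (s + e.2)).values := by
          have : (s2, i2) ∈ (PySem.List.insert rest ((pvBisect rest (s + e.2, i) 0 rest.length : Nat) : Int) (s + e.2, i)) := by
            rw [hq']; exact List.mem_cons_self
          have hmem3 := hq'perm.subset this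
          obtain ⟨p, hp, hpe3⟩ := List.mem_map.mp hmem3
          have : p.2 = s2 := (Prod.ext_iff.mp hpe3).1
          simp only [PySem.Dict.values]
          exact List.mem_map.mpr ⟨p, hp, this⟩
        have h1 : m ≤ s2 := hmin2 s2 hs2mem
        -- s2 ≤ m
        have h2 : s2 ≤ m := by
          have : m ∈ (PySem.List.insert rest ((pvBisect rest (s + e.2, i) 0 rest.length : Nat) : Int) (s + e.2, i)).map (fun x => x.1) :=
            hvals.subset hmmem
          obtain ⟨x, hx, hxe⟩ := List.mem_map.mp this
          rw [hq'] at hx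
          rcases List.mem_cons.mp hx with rfl | hr
          · omega
          · have := (List.pairwise_cons.mp (hq' ▸ hq'pw)).1 x hr
            unfold pvLtL at this
            omega
        omega

theorem pv_rel_init (k : Int) : pvRel
    ((PySem.List.pyRange 0 k).foldl (fun d i => d.insert i 0) PySem.Dict.empty)
    ((PySem.List.pyRange 0 k).map (fun i => ((0 : Int), i))) 0 := by
  have hitems : ((PySem.List.pyRange 0 k).foldl (fun d i => d.insert i 0) (PySem.Dict.empty : PySem.Dict Int Int)).items
      = (PySem.List.pyRange 0 k).map (fun i => (i, (0 : Int))) := by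
    have := PySem.Dict.items_foldl_insert_fresh (PySem.List.pyRange 0 k) (fun i => i)
      (fun _ => (0 : Int)) PySem.Dict.empty (fun a _ => by simp [pysem])
      (by simpa using PySem.List.nodup_pyRange_one 0 k)
    simpa using this
  refine ⟨?_, ?_, ?_, ?_⟩
  · simp only [PySem.Dict.keys, hitems, List.map_map]
    rw [List.pairwise_map]
    exact PySem.List.pairwise_lt_pyRange_one 0 k
  · refine List.Pairwise.map _ ?_ (PySem.List.pairwise_lt_pyRange_one 0 k)
    intro a b hab
    exact Or.inr ⟨rfl, hab⟩
  · rw [hitems, List.map_map]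
    exact List.Perm.refl _
  · intro s i rest hq
    have : (s, i) ∈ (PySem.List.pyRange 0 k).map (fun i => ((0 : Int), i)) := by
      rw [hq]; exact List.mem_cons_self
    obtain ⟨j, _, hje⟩ := List.mem_map.mp this
    exact (Prod.ext_iff.mp hje).1

theorem pv_loop_eq : ∀ (L : List (String × Int)) (parts : List (List (String × Int)))
    (d : PySem.Dict Int Int) (q : List (Int × Int)) (cur : Int), pvRel d q cur →
    (L.foldl pvStepA (parts, d, cur)).1 = (L.foldl pvStepB (parts, q)).1 := by
  intro L
  induction L with
  | nil => intro parts d q cur _; rfl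
  | cons e L ih =>
    intro parts d q cur h
    obtain ⟨heq, hrel⟩ := pv_step parts d cur q e h
    simp only [List.foldl_cons]
    have h2 := ih (pvStepA (parts, d, cur) e).1 (pvStepA (parts, d, cur) e).2.1
      (pvStepB (parts, q) e).2 (pvStepA (parts, d, cur) e).2.2 hrel
    calc (L.foldl pvStepA (pvStepA (parts, d, cur) e)).1
        = (L.foldl pvStepB ((pvStepA (parts, d, cur) e).1, (pvStepB (parts, q) e).2)).1 := h2
      _ = (L.foldl pvStepB (pvStepB (parts, q) e)).1 := by rw [heq]

-- ===== VERDICT (by name: the statement is the Claim_ definition above) =====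
theorem partition_to_re_chunks_spec : Claim_equal_partition_to_re_chunks := by
  intro li k _ _
  unfold Spec_partition_to_re_chunks partition_to_re_chunks partition_to_re_chunks_alt
  exact pv_loop_eq _ _ _ _ _ (pv_rel_init k)
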